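-- pv_equiv track=rewrite | github.com/insominiac21/Pdf-Outline-Extractor-end-to-end | pipeline.py | summarize_chunk
-- ===== SOURCE A (Python) =====
-- def summarize_chunk(text: str, max_words: int = 50) -> str:
--     """Create a brief summary of chunk text, preserving sentence boundaries."""
--     sentences = text.split(". ")
--     words = []
--     total_words = 0
--
--     for sentence in sentences:
--         sentence_words = sentence.split()
--         if total_words + len(sentence_words) <= max_words:
--             words.extend(sentence_words)
--             total_words += len(sentence_words)
--         else:
--             break
--
--     summary = " ".join(words)
--     return summary + "..." if total_words == max_words else summary
-- ===== SOURCE B (Python) =====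
-- def summarize_chunk(text: str, max_words: int = 50) -> str:
--     """Binary-search the prefix-sum table of per-sentence word counts (monotone,
--     since counts are nonnegative) for the number of leading sentences that fit."""
--     word_lists = [s.split() for s in text.split(". ")]
--     cum = [0]
--     for ws in word_lists:
--         cum.append(cum[-1] + len(ws))
--     # largest n with cum[n] <= max_words among the leading fitting prefix
--     lo, hi = 0, len(word_lists)
--     while lo < hi:
--         mid = (lo + hi + 1) // 2
--         if cum[mid] <= max_words:
--             lo = mid
--         else:
--             hi = mid - 1
--     summary = " ".join(w for ws in word_lists[:lo] for w in ws)
--     return summary + "..." if cum[lo] == max_words else summary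
-- ===== Notes on version B (the rewrite author's own statement) =====
-- stated objective: alternative
-- what changed: Replaces A's greedy accumulate-and-break loop by building a prefix-sum table of per-sentence word counts and BINARY-SEARCHING it (valid because the table is monotone, word counts being nonnegative) for the number of leading sentences that fit; summary and the ==max_words suffix rule are then read from the table.
import Mathlib
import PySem

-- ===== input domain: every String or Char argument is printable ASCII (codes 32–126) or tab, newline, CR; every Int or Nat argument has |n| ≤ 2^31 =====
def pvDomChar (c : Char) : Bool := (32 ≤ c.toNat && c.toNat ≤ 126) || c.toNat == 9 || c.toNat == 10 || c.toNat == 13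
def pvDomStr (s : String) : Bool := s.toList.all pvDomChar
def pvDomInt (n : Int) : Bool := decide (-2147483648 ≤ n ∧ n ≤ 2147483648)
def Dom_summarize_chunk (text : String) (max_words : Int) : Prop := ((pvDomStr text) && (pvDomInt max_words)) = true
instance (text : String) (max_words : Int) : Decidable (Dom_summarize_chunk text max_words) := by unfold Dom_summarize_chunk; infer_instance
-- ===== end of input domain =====

-- B replaces A's greedy accumulate-and-break loop by a prefix-sum table binary-searched
-- (monotone, counts nonnegative) for the number of leading sentences that fit (alternative algorithm, same cost).

-- ===== PORT A =====
-- A's for-loop with break, carrying (words, total_words)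
def pvALoop (max_words : Int) : List String → List String × Int → List String × Int
  | [], st => st
  | s :: rest, (words, total) =>
    let sw := PySem.Str.split₀ s
    if total + (sw.length : Int) ≤ max_words then
      pvALoop max_words rest (words ++ sw, total + (sw.length : Int))
    else (words, total)

def summarize_chunk (text : String) (max_words : Int) : String :=
  let sentences := (PySem.Str.split? text ". ").getD []   -- sep ". " ≠ "", so split? is always some
  let (words, total_words) := pvALoop max_words sentences ([], 0)
  let summary := PySem.Str.join " " words
  if total_words == max_words then summary ++ "..." else summary

-- ===== PORT B =====
-- Source B's cum-building loop: cum starts at [t]; each step appends last + count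
def pvCum (t : Int) : List Int → List Int
  | [] => [t]
  | c :: cs => t :: pvCum (t + c) cs

-- Source B's while-loop: lo,hi are always ≥ 0, so Nat; (lo+hi+1)/2 on Nat = Python's // here.
-- cum[mid]/cum[lo] are always in range in Source B (0 ≤ lo ≤ hi ≤ len(cum)-1), ported as getD.
-- fuel = an upper bound on hi - lo (a totality guard only; with fuel ≥ hi - lo it is the loop)
def pvBSearch (cum : List Int) (m : Int) : Nat → Nat → Nat → Nat
  | 0, lo, _ => lo
  | fuel + 1, lo, hi =>
    if lo < hi then
      let mid := (lo + hi + 1) / 2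
      if cum.getD mid 0 ≤ m then pvBSearch cum m fuel mid hi
      else pvBSearch cum m fuel lo (mid - 1)
    else lo

def summarize_chunk_alt (text : String) (max_words : Int) : String :=
  let wordLists := ((PySem.Str.split? text ". ").getD []).map PySem.Str.split₀
  let cum := pvCum 0 (wordLists.map (fun ws => (ws.length : Int)))
  let lo := pvBSearch cum max_words wordLists.length 0 wordLists.length
  let summary := PySem.Str.join " " (wordLists.take lo).flatten
  if cum.getD lo 0 == max_words then summary ++ "..." else summary

-- ===== PRECONDITION & SPEC =====
def Spec_summarize_chunk (text : String) (max_words : Int) (out : String) : Prop := out = summarize_chunk_alt text max_words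
instance (text : String) (max_words : Int) (out : String) : Decidable (Spec_summarize_chunk text max_words out) := by unfold Spec_summarize_chunk; infer_instance

-- ===== CLAIM (what is proved, stated in full; the proofs are below) =====
def Claim_equal_summarize_chunk : Prop := ∀ (text : String) (max_words : Int), Dom_summarize_chunk text max_words → Spec_summarize_chunk text max_words (summarize_chunk text max_words)

-- ===== LEMMAS AND PROOFS =====

-- itertools-free running sums used only in the proofs (tail of the cum table)
def pvAccum (t : Int) : List Int → List Int
  | [] => []
  | x :: xs => (t + x) :: pvAccum (t + x) xs

theorem pvCum_eq (t : Int) (cs : List Int) : pvCum t cs = t :: pvAccum t cs := by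
  induction cs generalizing t with
  | nil => rfl
  | cons c cs ih => simp [pvCum, pvAccum, ih]

theorem pvAccum_length (t : Int) (cs : List Int) : (pvAccum t cs).length = cs.length := by
  induction cs generalizing t with
  | nil => rfl
  | cons c cs ih => simp [pvAccum, ih]

theorem getLast?_getD_cons {α : Type} (a d : α) (l : List α) :
    (a :: l).getLast?.getD d = l.getLast?.getD a := by
  cases l with
  | nil => rfl
  | cons b t =>
    rw [List.getLast?_cons_cons,
        List.getLast?_eq_some_getLast (l := b :: t) (by simp)]
    rfl

-- main invariant: A's loop equals the prefix-sum reading of its result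
theorem pvALoop_eq (m : Int) (ss : List String) (w : List String) (t : Int) :
    pvALoop m ss (w, t) =
      (let L := ss.map PySem.Str.split₀
       let kept := (pvAccum t (L.map (fun ws => (ws.length : Int)))).takeWhile
                     (fun c => decide (c ≤ m))
       (w ++ (L.take kept.length).flatten, kept.getLast?.getD t)) := by
  induction ss generalizing w t with
  | nil => simp [pvALoop, pvAccum]
  | cons s rest ih =>
    simp only [pvALoop, List.map_cons, pvAccum, List.takeWhile]
    by_cases h : t + ((PySem.Str.split₀ s).length : Int) ≤ m
    · rw [if_pos h, ih, decide_eq_true h]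
      simp [List.take_succ_cons, getLast?_getD_cons, List.append_assoc]
    · rw [if_neg h, decide_eq_false h]
      simp

-- elements inside the takeWhile prefix satisfy the predicate
theorem takeWhile_getD {p : Int → Bool} (l : List Int) (i : Nat)
    (h : i < (l.takeWhile p).length) : p (l.getD i 0) = true := by
  induction l generalizing i with
  | nil => simp [List.takeWhile] at h
  | cons a l ih =>
    rw [List.takeWhile_cons] at h
    by_cases hp : p a = true
    · rw [if_pos hp] at h
      cases i with
      | zero => simpa using hp
      | succ i => simp only [List.length_cons] at h; exact ih i (by omega)
    · rw [if_neg hp] at h; simp at h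

-- the element just past the takeWhile prefix fails the predicate
theorem takeWhile_stop {p : Int → Bool} (l : List Int)
    (h : (l.takeWhile p).length < l.length) : p (l.getD (l.takeWhile p).length 0) = false := by
  induction l with
  | nil => simp at h
  | cons a l ih =>
    rw [List.takeWhile_cons] at h ⊢
    by_cases hp : p a = true
    · rw [if_pos hp] at h ⊢
      simp only [List.length_cons] at h
      simp only [List.length_cons, List.getD_cons_succ]
      exact ih (by omega)
    · rw [if_neg hp] at h ⊢
      simp only [List.length_nil, List.getD_cons_zero]
      simpa using hp

-- every running sum is ≥ the start when the entries are nonnegative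
theorem pvAccum_lb (t : Int) (cs : List Int) (hnn : ∀ c ∈ cs, 0 ≤ c)
    (j : Nat) (hj : j < cs.length) : t ≤ (pvAccum t cs).getD j 0 := by
  induction cs generalizing t j with
  | nil => simp at hj
  | cons c cs ih =>
    have hc : 0 ≤ c := hnn c (by simp)
    cases j with
    | zero => simp [pvAccum]; omega
    | succ j =>
      simp only [pvAccum, List.getD_cons_succ]
      have := ih (t + c) (fun x hx => hnn x (by simp [hx])) j (by simpa using Nat.lt_of_succ_lt_succ hj)
      omega

-- running sums are monotone when the entries are nonnegative
theorem pvAccum_mono (t : Int) (cs : List Int) (hnn : ∀ c ∈ cs, 0 ≤ c)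
    (i j : Nat) (hij : i ≤ j) (hj : j < cs.length) :
    (pvAccum t cs).getD i 0 ≤ (pvAccum t cs).getD j 0 := by
  induction cs generalizing t i j with
  | nil => simp at hj
  | cons c cs ih =>
    cases i with
    | zero =>
      cases j with
      | zero => exact le_refl _
      | succ j =>
        simp only [pvAccum, List.getD_cons_zero, List.getD_cons_succ]
        exact pvAccum_lb (t + c) cs (fun x hx => hnn x (by simp [hx])) j
          (by simpa using Nat.lt_of_succ_lt_succ hj)
    | succ i =>
      cases j with
      | zero => omega
      | succ j =>
        simp only [pvAccum, List.getD_cons_succ]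
        exact ih (t + c) (fun x hx => hnn x (by simp [hx])) i j (by omega)
          (by simpa using Nat.lt_of_succ_lt_succ hj)

-- the binary search returns k when cum[1..k] ≤ m and cum[k+1..N] > m
theorem pvBSearch_eq (cum : List Int) (m : Int) (k N : Nat)
    (hle : ∀ i, 1 ≤ i → i ≤ k → cum.getD i 0 ≤ m)
    (hgt : ∀ i, k < i → i ≤ N → m < cum.getD i 0) :
    ∀ fuel lo hi, hi - lo ≤ fuel → lo ≤ k → k ≤ hi → hi ≤ N → pvBSearch cum m fuel lo hi = k := by
  intro fuel
  induction fuel with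
  | zero => intro lo hi hf h1 h2 h3; simp only [pvBSearch]; omega
  | succ fuel ih =>
    intro lo hi hf h1 h2 h3
    simp only [pvBSearch]
    by_cases h : lo < hi
    · rw [if_pos h]
      set mid := (lo + hi + 1) / 2 with hmid
      have hm1 : lo < mid := by omega
      have hm2 : mid ≤ hi := by omega
      by_cases hc : cum.getD mid 0 ≤ m
      · rw [if_pos hc]
        have hmk : mid ≤ k := by
          by_contra hx
          exact absurd hc (not_le.mpr (hgt mid (by omega) (by omega)))
        exact ih mid hi (by omega) hmk h2 h3
      · rw [if_neg hc]
        have hmk : k < mid := by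
          by_contra hx
          exact hc (hle mid (by omega) (by omega))
        exact ih lo (mid - 1) (by omega) h1 (by omega) (by omega)
    · rw [if_neg h]; omega

-- ===== VERDICT (by name: the statement is the Claim_ definition above) =====
theorem summarize_chunk_spec : Claim_equal_summarize_chunk := by
  intro text max_words _
  unfold Spec_summarize_chunk summarize_chunk summarize_chunk_alt
  simp only [pvALoop_eq, List.nil_append, pvCum_eq]
  set L := ((PySem.Str.split? text ". ").getD []).map PySem.Str.split₀ with hL
  set counts := L.map (fun ws => (ws.length : Int)) with hcounts
  set tailc := pvAccum 0 counts with htailc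
  set k := (tailc.takeWhile (fun c => decide (c ≤ max_words))).length with hk
  have hnn : ∀ c ∈ counts, 0 ≤ c := by
    intro c hc
    rcases List.mem_map.mp hc with ⟨ws, _, rfl⟩
    exact Int.natCast_nonneg _
  have hlen : tailc.length = counts.length := pvAccum_length 0 counts
  have hkle : k ≤ counts.length := by
    rw [hk, ← hlen]; exact (List.takeWhile_prefix _).length_le
  have hNlen : counts.length = L.length := by simp [hcounts]
  -- binary search finds k
  have hbs : pvBSearch (0 :: tailc) max_words L.length 0 L.length = k := by
    apply pvBSearch_eq (0 :: tailc) max_words k L.length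
    · intro i h1 h2
      obtain ⟨i', rfl⟩ : ∃ i', i = i' + 1 := ⟨i - 1, by omega⟩
      simp only [List.getD_cons_succ]
      have := takeWhile_getD (p := fun c => decide (c ≤ max_words)) tailc i' (by omega)
      simpa using this
    · intro i h1 h2
      obtain ⟨i', rfl⟩ : ∃ i', i = i' + 1 := ⟨i - 1, by omega⟩
      simp only [List.getD_cons_succ]
      have hkN : k < tailc.length := by omega
      have hstop := takeWhile_stop (p := fun c => decide (c ≤ max_words)) tailc hkN
      rw [← hk] at hstop
      have hkval : max_words < tailc.getD k 0 := by
        have := of_decide_eq_false hstop; omega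
      have hmono := pvAccum_mono 0 counts hnn k i' (by omega) (by omega)
      rw [← htailc] at hmono; omega
    · omega
    · omega
    · omega
    · omega
  rw [hbs]
  -- total_words of A equals cum[k]
  have htot : (tailc.takeWhile (fun c => decide (c ≤ max_words))).getLast?.getD 0
      = (0 :: tailc).getD k 0 := by
    cases hkz : k with
    | zero =>
      have : tailc.takeWhile (fun c => decide (c ≤ max_words)) = [] :=
        List.eq_nil_of_length_eq_zero (by omega)
      simp [this]
    | succ k' =>
      have hne : tailc.takeWhile (fun c => decide (c ≤ max_words)) ≠ [] := by
        intro hnil; rw [hnil] at hk; simp at hk; omega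
      rw [List.getLast?_eq_some_getLast hne, Option.getD_some, List.getLast_eq_getElem,
          List.getD_cons_succ]
      have hpre := List.takeWhile_prefix (l := tailc) (p := fun c => decide (c ≤ max_words))
      have hgetd : tailc.getD k' 0 = tailc[k']'(by omega) := List.getD_eq_getElem tailc 0 (by omega)
      rw [hgetd]
      have := List.IsPrefix.getElem hpre
        (i := (tailc.takeWhile (fun c => decide (c ≤ max_words))).length - 1) (by omega)
      rw [this]
      congr 1
      omega
  rw [htot]
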